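-- pv_equiv track=rewrite | github.com/Arsen1302/Code-copy-detector | TestData/solutions/problem_1236_3.py | solution_1236_3
-- ===== SOURCE A (Python) =====
-- from typing import List
--
-- def solution_1236_3(logs: List[List[int]], k: int) -> List[int]:
--     d = {}
--     for i in logs:
--         if i[0] in d:
--             if i[1] not in d[i[0]]:
--                 d[i[0]] = d[i[0]] + [i[1]]
--         else:
--             d[i[0]] = [i[1]]
--     res = [0]*k
--     for i in d.values():
--         res[len(i)-1] += 1
--     return res
-- ===== SOURCE B (Python) =====
-- from typing import List
--
-- def solution_1236_3(logs: List[List[int]], k: int) -> List[int]: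
--     pairs = sorted({(x[0], x[1]) for x in logs}, key=lambda p: p[0])
--     res = [0] * k
--     run = 0
--     prev = None
--     for u, _ in pairs:
--         if u != prev and run > 0:
--             res[run - 1] += 1
--             run = 0
--         run += 1
--         prev = u
--     if run > 0:
--         res[run - 1] += 1
--     return res
-- ===== Notes on version B (the rewrite author's own statement) =====
-- stated objective: alternative
-- what changed: B replaces A's dict of per-user request lists (inner membership scan per log entry) by sort-then-group: dedup the (user,request) pairs as a set, sort them by user, and run-length-scan the sorted list tallying each maximal equal-user run into the histogram.
import Mathlib
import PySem

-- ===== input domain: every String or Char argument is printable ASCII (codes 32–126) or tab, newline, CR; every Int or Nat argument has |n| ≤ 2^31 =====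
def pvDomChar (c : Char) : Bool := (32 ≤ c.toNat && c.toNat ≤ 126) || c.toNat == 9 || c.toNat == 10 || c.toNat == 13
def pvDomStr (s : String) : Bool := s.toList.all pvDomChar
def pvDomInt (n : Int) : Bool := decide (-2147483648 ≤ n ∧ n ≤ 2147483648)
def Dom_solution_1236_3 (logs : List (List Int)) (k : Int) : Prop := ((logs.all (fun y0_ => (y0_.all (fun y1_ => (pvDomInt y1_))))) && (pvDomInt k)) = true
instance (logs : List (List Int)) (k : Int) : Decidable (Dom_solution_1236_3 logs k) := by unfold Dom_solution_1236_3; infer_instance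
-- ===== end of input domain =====

-- B replaces A's dict of per-user request lists by sort-then-group: dedup (user,request) pairs
-- as a set, sort by user, and run-length-scan the sorted list into the histogram (objective: alternative).


-- ===== PORT A =====
-- d : dict user -> list of that user's distinct requests (first-occurrence order);
-- i[0], i[1] and res[...] use the total pyGetD/pySetD forms — exact under Pre_ (in range there).
def solution_1236_3 (logs : List (List Int)) (k : Int) : List Int :=
  let d : PySem.Dict Int (List Int) := logs.foldl (fun d i =>
    let u := PySem.List.pyGetD i 0 0
    if d.contains u then
      (if PySem.List.pyGetD i 1 0 ∈ d.getD u [] then d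
       else d.insert u (d.getD u [] ++ [PySem.List.pyGetD i 1 0]))
    else d.insert u [PySem.List.pyGetD i 1 0]) PySem.Dict.empty
  d.values.foldl (fun res l =>
      PySem.List.pySetD res (PySem.List.len l - 1)
        (PySem.List.pyGetD res (PySem.List.len l - 1) 0 + 1))
    (PySem.List.pyRepeat [0] k)

-- ===== PORT B =====
-- pairs = sorted({(x[0], x[1]) for x in logs}, key=lambda p: p[0]); then a run-length scan:
-- state (res, run, prev); each time the user changes, tally the finished run; final flush after the loop.
def solution_1236_3_alt (logs : List (List Int)) (k : Int) : List Int :=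
  let pairs : List (Int × Int) :=
    PySem.List.sorted (PySem.Set.ofList (logs.map (fun x => (PySem.List.pyGetD x 0 0, PySem.List.pyGetD x 1 0))))
      (fun p => p.1) false
  let st : List Int × Int × Option Int := pairs.foldl (fun st p =>
      if some p.1 ≠ st.2.2 ∧ 0 < st.2.1 then
        (PySem.List.pySetD st.1 (st.2.1 - 1) (PySem.List.pyGetD st.1 (st.2.1 - 1) 0 + 1), 1, some p.1)
      else (st.1, st.2.1 + 1, some p.1))
    (PySem.List.pyRepeat [0] k, 0, none)
  if 0 < st.2.1 then
    PySem.List.pySetD st.1 (st.2.1 - 1) (PySem.List.pyGetD st.1 (st.2.1 - 1) 0 + 1)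
  else st.1

-- ===== PRECONDITION & SPEC =====
-- Pre_ excludes exactly the inputs where the Python A raises IndexError: a log entry with fewer
-- than two elements (i[1]), or a user whose number of distinct requests exceeds k (res[len-1]).
def Pre_solution_1236_3 (logs : List (List Int)) (k : Int) : Prop :=
  (∀ l ∈ logs, 2 ≤ l.length) ∧
  (∀ l ∈ logs,
    ((((logs.map (fun x => (x.getD 0 0, x.getD 1 0))).dedup.filter
        (fun p => p.1 == l.getD 0 0)).length : Int) ≤ k))
instance (logs : List (List Int)) (k : Int) : Decidable (Pre_solution_1236_3 logs k) := by
  unfold Pre_solution_1236_3; infer_instance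
def pvWitness_solution_1236_3 : List (List Int) × Int := ([[1, 2], [1, 3], [1, 2], [2, 7]], 2)

def Spec_solution_1236_3 (logs : List (List Int)) (k : Int) (out : List Int) : Prop := out = solution_1236_3_alt logs k
instance (logs : List (List Int)) (k : Int) (out : List Int) : Decidable (Spec_solution_1236_3 logs k out) := by unfold Spec_solution_1236_3; infer_instance

-- ===== CLAIM (what is proved, stated in full; the proofs are below) =====
def Claim_equal_solution_1236_3 : Prop := ∀ (logs : List (List Int)) (k : Int), Dom_solution_1236_3 logs k → Pre_solution_1236_3 logs k → Spec_solution_1236_3 logs k (solution_1236_3 logs k)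

-- ===== LEMMAS AND PROOFS =====

-- the distinct users of a dedupped pair list P, in first-occurrence order
def pvUsers (P : List (Int × Int)) : List Int := PySem.Set.ofList (P.map Prod.fst)
-- the requests P records for user u, in order
def pvReqs (P : List (Int × Int)) (u : Int) : List Int :=
  (P.filter (fun p => p.1 == u)).map Prod.snd
-- the items list A's dict has after absorbing exactly the distinct pairs P
def pvItems (P : List (Int × Int)) : List (Int × List Int) :=
  (pvUsers P).map (fun u => (u, pvReqs P u))

lemma pvReqs_mem (P : List (Int × Int)) (u r : Int) : r ∈ pvReqs P u ↔ (u, r) ∈ P := by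
  simp only [pvReqs, List.mem_map, List.mem_filter]
  constructor
  · rintro ⟨⟨a, b⟩, ⟨hm, he⟩, rfl⟩
    simpa [show a = u from by simpa using he] using hm
  · intro h; exact ⟨(u, r), ⟨h, by simp⟩, rfl⟩

lemma pvUsers_mem (P : List (Int × Int)) (u : Int) :
    u ∈ pvUsers P ↔ ∃ r, (u, r) ∈ P := by
  simp only [pvUsers, PySem.Set.mem_ofList, List.mem_map, Prod.exists]
  constructor
  · rintro ⟨a, b, hm, rfl⟩; exact ⟨b, hm⟩
  · rintro ⟨r, hm⟩; exact ⟨u, r, hm, rfl⟩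

lemma pvItems_keys (P : List (Int × Int)) : (pvItems P).map Prod.fst = pvUsers P := by
  simp [pvItems, List.map_map, Function.comp_def]

lemma pvReqs_append (P : List (Int × Int)) (u x y : Int) :
    pvReqs (P ++ [(x, y)]) u = pvReqs P u ++ if x = u then [y] else [] := by
  by_cases h : x = u <;> simp [pvReqs, List.filter_append, h]

-- one step of A's loop on a fresh/stale pair keeps the dict characterised by pvItems
lemma pvStep_inv (d : PySem.Dict Int (List Int)) (P : List (Int × Int)) (u r : Int)
    (hP : P.Nodup) (hd : d.items = pvItems P) :
    (if d.contains u then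
      (if r ∈ d.getD u [] then d else d.insert u (d.getD u [] ++ [r]))
     else d.insert u [r]).items = pvItems (PySem.Set.add P (u, r)) ∧
    (PySem.Set.add P (u, r)).Nodup := by
  have hkeys : d.keys = pvUsers P := by
    simp only [PySem.Dict.keys, hd]; exact pvItems_keys P
  have hknd : d.keys.Nodup := by rw [hkeys]; exact PySem.Set.nodup_ofList _
  have hcont : d.contains u = true ↔ u ∈ pvUsers P := by
    rw [PySem.Dict.contains_iff_mem_keys, hkeys]
  refine ⟨?_, PySem.Set.nodup_add P (u, r) hP⟩
  by_cases hup : (u, r) ∈ P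
  · -- pair already recorded: both sides unchanged
    have hu : d.contains u = true := hcont.mpr ((pvUsers_mem P u).mpr ⟨r, hup⟩)
    have hitem : (u, pvReqs P u) ∈ d.items := by
      rw [hd]; exact List.mem_map_of_mem ((pvUsers_mem P u).mpr ⟨r, hup⟩)
    have hget : d.getD u [] = pvReqs P u := PySem.Dict.getD_of_mem_items d hitem hknd []
    rw [PySem.Set.add_of_mem hup]
    simp [hu, hget, (pvReqs_mem P u r).mpr hup, hd]
  · rw [PySem.Set.add_of_not_mem hup]
    by_cases hu : u ∈ pvUsers P
    · -- known user, new request: value at u gets r appended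
      have hc : d.contains u = true := hcont.mpr hu
      have hitem : (u, pvReqs P u) ∈ d.items := by rw [hd]; exact List.mem_map_of_mem hu
      have hget : d.getD u [] = pvReqs P u := PySem.Dict.getD_of_mem_items d hitem hknd []
      have hr : r ∉ pvReqs P u := fun h => hup ((pvReqs_mem P u r).mp h)
      have husers : pvUsers (P ++ [(u, r)]) = pvUsers P := by
        simp only [pvUsers, List.map_append, List.map_singleton]
        rw [PySem.Set.ofList_append_singleton]
        exact PySem.Set.add_of_mem (by simpa [pvUsers] using hu)
      rw [hc, if_pos rfl]
      rw [hget, if_neg hr]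
      rw [PySem.Dict.items_insert_of_contains d _ hc, hd]
      simp only [pvItems, husers, List.map_map]
      refine List.map_congr_left (fun w _ => ?_)
      by_cases hw : w = u
      · subst hw; simp [pvReqs_append]
      · simp [Function.comp, hw, Ne.symm hw, pvReqs_append]
    · -- new user: a fresh key is appended at the end
      have hc : d.contains u = false := by
        cases h : d.contains u
        · rfl
        · exact absurd (hcont.mp h) hu
      have hnone : ∀ p ∈ P, p.1 ≠ u := by
        rintro ⟨a, b⟩ hm rfl; exact hu ((pvUsers_mem P a).mpr ⟨b, hm⟩)
      have husers : pvUsers (P ++ [(u, r)]) = pvUsers P ++ [u] := by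
        simp only [pvUsers, List.map_append, List.map_singleton]
        rw [PySem.Set.ofList_append_singleton]
        exact PySem.Set.add_of_not_mem (by simpa [pvUsers] using hu)
      rw [if_neg (by simp [hc])]
      rw [PySem.Dict.items_insert_of_not_contains d _ hc, hd]
      simp only [pvItems, husers, List.map_append, List.map_singleton]
      congr 1
      · refine List.map_congr_left (fun w hw => ?_)
        have : u ≠ w := fun h => hu (h ▸ hw)
        simp [pvReqs_append, this]
      · have : pvReqs P u = [] := by
          simp only [pvReqs, List.map_eq_nil_iff, List.filter_eq_nil_iff]
          intro p hp; simpa using hnone p hp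
        simp [pvReqs_append, this]

-- A's whole dict-building loop, over any already-absorbed dedupped prefix
lemma pvLoop_inv (xs : List (Int × Int)) : ∀ (P : List (Int × Int)) (d : PySem.Dict Int (List Int)),
    P.Nodup → d.items = pvItems P →
    (xs.foldl (fun d p =>
        if d.contains p.1 then
          (if p.2 ∈ d.getD p.1 [] then d else d.insert p.1 (d.getD p.1 [] ++ [p.2]))
        else d.insert p.1 [p.2]) d).items = pvItems (xs.foldl PySem.Set.add P) := by
  induction xs with
  | nil => intro P d _ hd; simpa using hd
  | cons p rest ih =>
    intro P d hP hd
    obtain ⟨h1, h2⟩ := pvStep_inv d P p.1 p.2 hP hd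
    simpa using ih (PySem.Set.add P (p.1, p.2)) _ h2 (by simpa using h1)

-- A's dict over the raw pair stream has the items of the dedupped pair list
lemma pvDictA (prs : List (Int × Int)) :
    (prs.foldl (fun d p =>
        if d.contains p.1 then
          (if p.2 ∈ d.getD p.1 [] then d else d.insert p.1 (d.getD p.1 [] ++ [p.2]))
        else d.insert p.1 [p.2]) PySem.Dict.empty).items = pvItems (PySem.List.dedup prs) := by
  have h := pvLoop_inv prs [] PySem.Dict.empty List.nodup_nil (by rfl)
  rw [h, PySem.List.dedup, PySem.Set.ofList_eq_foldl]

-- ---- B-side machinery: run-length scan of the sorted key list ----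

-- 'res[c-1] += 1': the one tally step both programs make
def pvStep (res : List Int) (c : Int) : List Int :=
  PySem.List.pySetD res (c - 1) (PySem.List.pyGetD res (c - 1) 0 + 1)

-- run lengths of a key list, with an open run of user u of length run
def pvRlF (u run : Int) : List Int → List Int
  | [] => [run]
  | v :: ks => if v = u then pvRlF u (run + 1) ks else run :: pvRlF v 1 ks

-- run lengths of a key list
def pvRl : List Int → List Int
  | [] => []
  | v :: ks => pvRlF v 1 ks

lemma pvRlF_pos (x : Int) : ∀ (ks : List Int) (u run : Int), 0 < run → x ∈ pvRlF u run ks → 1 ≤ x := by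
  intro ks
  induction ks with
  | nil => intro u run hr hm; simp [pvRlF] at hm; omega
  | cons v ks ih =>
    intro u run hr hm
    by_cases h : v = u
    · exact ih u (run + 1) (by omega) (by simpa [pvRlF, h] using hm)
    · rcases (by simpa [pvRlF, h] using hm : x = run ∨ x ∈ pvRlF v 1 ks) with h1 | h1
      · omega
      · exact ih v 1 (by omega) h1

lemma pvRl_pos (K : List Int) (x : Int) (hm : x ∈ pvRl K) : 1 ≤ x := by
  cases K with
  | nil => simp [pvRl] at hm
  | cons v ks => exact pvRlF_pos x ks v 1 (by omega) (by simpa [pvRl] using hm)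

-- B's loop body, named for the proofs (definitionally the port's lambda)
def pvBStep (st : List Int × Int × Option Int) (p : Int × Int) : List Int × Int × Option Int :=
  if some p.1 ≠ st.2.2 ∧ 0 < st.2.1 then (pvStep st.1 st.2.1, 1, some p.1)
  else (st.1, st.2.1 + 1, some p.1)

-- B's loop + final flush computes the fold of pvStep over the run lengths
lemma pvBLoop (S : List (Int × Int)) : ∀ (res : List Int) (run u : Int), 0 < run →
    (let st := S.foldl pvBStep (res, run, some u)
     if 0 < st.2.1 then pvStep st.1 st.2.1 else st.1)
      = (pvRlF u run (S.map Prod.fst)).foldl pvStep res := by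
  induction S with
  | nil => intro res run u hr; simp [pvRlF, hr]
  | cons p S ih =>
    intro res run u hr
    by_cases h : p.1 = u
    · have hstep : pvBStep (res, run, some u) p = (res, run + 1, some u) := by
        simp [pvBStep, h]
      simp only [List.foldl_cons, hstep, List.map_cons, pvRlF, if_pos h]
      exact ih res (run + 1) u (by omega)
    · have hstep : pvBStep (res, run, some u) p = (pvStep res run, 1, some p.1) := by
        simp [pvBStep, h, hr]
      simp only [List.foldl_cons, hstep, List.map_cons, pvRlF, if_neg h]
      exact ih (pvStep res run) 1 p.1 (by omega)

lemma pvBStart (S : List (Int × Int)) (res : List Int) :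
    (let st := S.foldl pvBStep (res, 0, none)
     if 0 < st.2.1 then pvStep st.1 st.2.1 else st.1)
      = (pvRl (S.map Prod.fst)).foldl pvStep res := by
  cases S with
  | nil => simp [pvRl]
  | cons p S =>
    have hstep : pvBStep (res, 0, none) p = (res, 1, some p.1) := by
      simp [pvBStep]
    simp only [List.foldl_cons, hstep, List.map_cons, pvRl]
    exact pvBLoop S res 1 p.1 (by omega)

-- closing a run over a replicate block
lemma pvRlF_replicate (u : Int) : ∀ (n : Nat) (run : Int) (d : List Int), d.head? ≠ some u →
    pvRlF u run (List.replicate n u ++ d) = (run + n) :: pvRl d := by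
  intro n
  induction n with
  | zero =>
    intro run d hd
    cases d with
    | nil => simp [pvRlF, pvRl]
    | cons w d' =>
      have hw : w ≠ u := by intro h; exact hd (by simp [h])
      simp [pvRlF, pvRl, hw]
  | succ n ih =>
    intro run d hd
    have : pvRlF u run (List.replicate (n + 1) u ++ d) = pvRlF u (run + 1) (List.replicate n u ++ d) := by
      simp [List.replicate_succ, pvRlF]
    rw [this, ih (run + 1) d hd]
    congr 1
    push_cast
    ring

-- the run lengths of a sorted key list, as a multiset, are the per-user counts
lemma pvRl_perm_aux : ∀ (n : Nat) (K : List Int), K.length ≤ n → K.Pairwise (· ≤ ·) →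
    (pvRl K).Perm ((PySem.Set.ofList K).map (fun u => (K.count u : Int))) := by
  intro n
  induction n with
  | zero =>
    intro K hlen _
    have : K = [] := List.eq_nil_of_length_eq_zero (by omega)
    simp [this, pvRl, PySem.Set.ofList]
  | succ n ih =>
    intro K hlen hpw
    cases K with
    | nil => simp [pvRl, PySem.Set.ofList]
    | cons v rest =>
      have hvle : ∀ x ∈ rest, v ≤ x := fun x hx => (List.pairwise_cons.mp hpw).1 x hx
      have hpwrest : rest.Pairwise (· ≤ ·) := (List.pairwise_cons.mp hpw).2
      set t := rest.takeWhile (fun x => x == v) with ht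
      set d := rest.dropWhile (fun x => x == v) with hd
      have hrest : rest = t ++ d := (List.takeWhile_append_dropWhile).symm
      have htv : ∀ x ∈ t, x = v := fun x hx => by
        simpa using List.mem_takeWhile_imp hx
      have htrep : t = List.replicate t.length v :=
        List.eq_replicate_of_mem htv
      have hdhead : d.head? ≠ some v := by
        intro h
        have hnot := List.head?_dropWhile_not (fun x => x == v) rest
        rw [← hd, h] at hnot
        simp at hnot
      have hpwd : d.Pairwise (· ≤ ·) := by
        rw [hrest] at hpwrest
        exact (List.pairwise_append.mp hpwrest).2.1
      have hvd : v ∉ d := by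
        intro hvmem
        cases hdc : d with
        | nil => simp [hdc] at hvmem
        | cons w d' =>
          have hw : w ≠ v := by
            intro h; exact hdhead (by simp [hdc, h])
          have hwle : v ≤ w := hvle w (by rw [hrest, hdc]; simp)
          have hvlt : v < w := lt_of_le_of_ne hwle (Ne.symm hw)
          rw [hdc] at hvmem
          rcases List.mem_cons.mp hvmem with h | h
          · exact hw h.symm
          · have : w ≤ v := by
              rw [hdc] at hpwd
              exact (List.pairwise_cons.mp hpwd).1 v h
            omega
      -- counts
      have hcv : (v :: rest).count v = t.length + 1 := by
        rw [hrest, htrep]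
        simp [List.count_append, List.count_eq_zero_of_not_mem hvd]
      have hcu : ∀ u ∈ d, (v :: rest).count u = d.count u := by
        intro u hu
        have huv : u ≠ v := fun h => hvd (h ▸ hu)
        rw [hrest, htrep]
        simp [List.count_append, List.count_replicate, Ne.symm huv]
      -- the distinct users
      have hnd1 : (PySem.Set.ofList (v :: rest) : List Int).Nodup := PySem.Set.nodup_ofList _
      have hnd2 : (v :: (PySem.Set.ofList d : List Int)).Nodup := by
        refine List.nodup_cons.mpr ⟨fun h => hvd ((PySem.Set.mem_ofList _ _).mp h), PySem.Set.nodup_ofList _⟩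
      have hofK : (PySem.Set.ofList (v :: rest) : List Int).Perm (v :: PySem.Set.ofList d) := by
        rw [List.perm_ext_iff_of_nodup hnd1 hnd2]
        intro a
        rw [PySem.Set.mem_ofList]
        simp only [List.mem_cons, PySem.Set.mem_ofList]
        constructor
        · rintro (h | h)
          · exact Or.inl h
          · rw [hrest] at h
            rcases List.mem_append.mp h with h | h
            · exact Or.inl (htv a h)
            · exact Or.inr h
        · rintro (h | h)
          · exact Or.inl h
          · exact Or.inr (by rw [hrest]; exact List.mem_append.mpr (Or.inr h))
      -- left side: first run closes over the replicate block
      have hL : pvRl (v :: rest) = ((1 : Int) + t.length) :: pvRl d := by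
        show pvRlF v 1 rest = _
        rw [hrest, htrep, pvRlF_replicate v t.length 1 d hdhead, htrep]
        simp
      -- assemble
      rw [hL]
      refine List.Perm.trans ?_ ((hofK.map _).symm)
      simp only [List.map_cons]
      have hcv' : ((v :: rest).count v : Int) = 1 + t.length := by rw [hcv]; push_cast; ring
      rw [hcv']
      refine List.Perm.cons _ ?_
      have hmapeq : (PySem.Set.ofList d : List Int).map (fun u => ((v :: rest).count u : Int))
          = (PySem.Set.ofList d : List Int).map (fun u => (d.count u : Int)) := by
        refine List.map_congr_left (fun u hu => ?_)
        rw [hcu u ((PySem.Set.mem_ofList _ _).mp hu)]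
      rw [hmapeq]
      refine ih d ?_ hpwd
      have : rest.length = t.length + d.length := by rw [hrest]; simp
      simp only [List.length_cons] at hlen
      omega

lemma pvRl_perm (K : List Int) (hpw : K.Pairwise (· ≤ ·)) :
    (pvRl K).Perm ((PySem.Set.ofList K).map (fun u => (K.count u : Int))) :=
  pvRl_perm_aux K.length K le_rfl hpw

-- the tally step on two positive counts commutes
lemma pvStep_comm (res : List Int) (a b : Int) (ha : 1 ≤ a) (hb : 1 ≤ b) :
    pvStep (pvStep res a) b = pvStep (pvStep res b) a := by
  have ha' : (0 : Int) ≤ a - 1 := by omega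
  have hb' : (0 : Int) ≤ b - 1 := by omega
  by_cases hab : a = b
  · rw [hab]
  · have hij : (a - 1).toNat ≠ (b - 1).toNat := by omega
    simp only [pvStep, PySem.List.pySetD_of_nonneg _ _ ha', PySem.List.pySetD_of_nonneg _ _ hb',
      PySem.List.pyGetD, PySem.List.pyGet?_of_nonneg _ ha', PySem.List.pyGet?_of_nonneg _ hb']
    rw [List.getElem?_set_ne hij, List.getElem?_set_ne (Ne.symm hij), List.set_comm _ _ hij]

-- folding the tally step over a permutation of positive counts gives the same result
lemma pvFoldl_perm (l1 l2 : List Int) (h : l1.Perm l2) (hpos : ∀ x ∈ l1, 1 ≤ x) (res : List Int) :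
    l1.foldl pvStep res = l2.foldl pvStep res := by
  refine h.foldl_eq' ?_ res
  intro x hx y hy z
  exact pvStep_comm z x y (hpos x hx) (hpos y hy)

-- ===== VERDICT (by name: the statement is the Claim_ definition above) =====
theorem solution_1236_3_spec : Claim_equal_solution_1236_3 := by
  intro logs k _ _
  unfold Spec_solution_1236_3 solution_1236_3 solution_1236_3_alt
  set prs : List (Int × Int) := logs.map (fun x => (PySem.List.pyGetD x 0 0, PySem.List.pyGetD x 1 0)) with hprs
  set P : List (Int × Int) := PySem.List.dedup prs with hP
  -- A reads the entries only through i[0], i[1]: fold over the pair stream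
  have hA : logs.foldl (fun d i =>
      let u := PySem.List.pyGetD i 0 0
      if d.contains u then
        (if PySem.List.pyGetD i 1 0 ∈ d.getD u [] then d
         else d.insert u (d.getD u [] ++ [PySem.List.pyGetD i 1 0]))
      else d.insert u [PySem.List.pyGetD i 1 0]) PySem.Dict.empty
      = prs.foldl (fun d p =>
            if d.contains p.1 then
              (if p.2 ∈ d.getD p.1 [] then d else d.insert p.1 (d.getD p.1 [] ++ [p.2]))
            else d.insert p.1 [p.2]) PySem.Dict.empty := by
    rw [hprs, List.foldl_map]
  simp only [hA, PySem.Dict.values]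
  rw [pvDictA, ← hP]
  -- A's tally loop is the fold of pvStep over the per-user distinct-request counts
  have hAfold : ∀ res0 : List Int,
      ((pvItems P).map Prod.snd).foldl (fun res l =>
        PySem.List.pySetD res (PySem.List.len l - 1)
          (PySem.List.pyGetD res (PySem.List.len l - 1) 0 + 1)) res0
      = ((pvUsers P).map (fun u => ((pvReqs P u).length : Int))).foldl pvStep res0 := by
    intro res0
    simp only [pvItems, List.map_map, List.foldl_map, Function.comp_def]
    refine PySem.List.foldl_congr_mem _ _ _ _ (fun res u _ => ?_)
    simp [pvStep, PySem.List.len_eq]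
  rw [hAfold]
  -- B's loop + flush is the fold of pvStep over the run lengths of the sorted key list
  set S : List (Int × Int) := PySem.List.sorted (PySem.Set.ofList prs) (fun p => p.1) false with hS
  have hPS : PySem.Set.ofList prs = P := by rw [hP, PySem.List.dedup_eq_ofList]
  rw [hPS] at hS
  have hlam : (fun (st : List Int × Int × Option Int) (p : Int × Int) =>
      if some p.1 ≠ st.2.2 ∧ 0 < st.2.1 then
        (PySem.List.pySetD st.1 (st.2.1 - 1) (PySem.List.pyGetD st.1 (st.2.1 - 1) 0 + 1), 1, some p.1)
      else (st.1, st.2.1 + 1, some p.1)) = pvBStep := by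
    funext st p
    simp [pvBStep, pvStep]
  have hB := pvBStart S (PySem.List.pyRepeat [0] k)
  simp only [pvStep] at hB
  rw [hlam, hB]
  -- the two count lists are permutations of each other
  set K : List Int := S.map Prod.fst with hK
  have hKperm : K.Perm (P.map Prod.fst) := (PySem.List.sorted_perm P (fun p => p.1) false).map Prod.fst
  have hcount : ∀ u : Int, (K.count u : Int) = ((pvReqs P u).length : Int) := by
    intro u
    rw [hKperm.count_eq]
    simp only [pvReqs, List.length_map, List.count_eq_countP, List.countP_map]
    rw [← List.countP_eq_length_filter]
    simp [Function.comp_def]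
  have hpwK : K.Pairwise (· ≤ ·) := by
    rw [hK, hS]
    exact PySem.List.sorted_map_key_pairwise P (fun p => p.1)
  have husers : (PySem.Set.ofList K : List Int).Perm (pvUsers P) := by
    show (PySem.Set.ofList K : List Int).Perm (PySem.Set.ofList (P.map Prod.fst))
    rw [List.perm_ext_iff_of_nodup (PySem.Set.nodup_ofList _) (PySem.Set.nodup_ofList _)]
    intro a
    rw [PySem.Set.mem_ofList, PySem.Set.mem_ofList]
    exact hKperm.mem_iff
  have hperm : (pvRl K).Perm ((pvUsers P).map (fun u => ((pvReqs P u).length : Int))) := by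
    refine (pvRl_perm K hpwK).trans ?_
    have hfun : (fun u => (K.count u : Int)) = (fun u => ((pvReqs P u).length : Int)) :=
      funext hcount
    rw [hfun]
    exact husers.map _
  exact (pvFoldl_perm _ _ hperm (fun x hx => pvRl_pos K x hx) _).symm
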